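-- pv_equiv track=rewrite | github.com/kmkirov/Monopoly-Standart- | gui_functions.py | find_position_x_y
-- ===== SOURCE A (Python) =====
-- go_player_picturex = 497
--
-- go_player_picturey = 501
--
-- start_trip = 500
--
-- end_trip = 50
--
-- step_trip = 46
--
-- magic_trip = 20
--
-- def find_position_x_y(position):
--     picx = go_player_picturex
--     picy = go_player_picturey
--     for a in range(position):
--         if picx > end_trip and picy >start_trip:
--
--             picx = picx - step_trip
--             picy = picy
--
--
--         elif picx <end_trip and picy >end_trip:
--
--             picx = picx
--             picy = picy - step_trip
--
--         elif picx < start_trip - magic_trip and picy <end_trip: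
--             picx = picx + step_trip
--             picy = picy
--         else :
--             picx = picx
--             picy = picy + step_trip
--     return (picx,picy)
-- ===== SOURCE B (Python) =====
-- def find_position_x_y(position):
--     p = 0 if position <= 0 else position % 40
--     if p <= 10:
--         return (497 - 46 * p, 501)
--     if p <= 20:
--         return (37, 501 - 46 * (p - 10))
--     if p <= 30:
--         return (37 + 46 * (p - 20), 41)
--     return (497, 41 + 46 * (p - 30))
-- ===== Notes on version B (the rewrite author's own statement) =====
-- stated objective: faster
-- what changed: Replaced the O(position) step-by-step walk around the board with position mod 40 and a closed-form formula per board side.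
import Mathlib
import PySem

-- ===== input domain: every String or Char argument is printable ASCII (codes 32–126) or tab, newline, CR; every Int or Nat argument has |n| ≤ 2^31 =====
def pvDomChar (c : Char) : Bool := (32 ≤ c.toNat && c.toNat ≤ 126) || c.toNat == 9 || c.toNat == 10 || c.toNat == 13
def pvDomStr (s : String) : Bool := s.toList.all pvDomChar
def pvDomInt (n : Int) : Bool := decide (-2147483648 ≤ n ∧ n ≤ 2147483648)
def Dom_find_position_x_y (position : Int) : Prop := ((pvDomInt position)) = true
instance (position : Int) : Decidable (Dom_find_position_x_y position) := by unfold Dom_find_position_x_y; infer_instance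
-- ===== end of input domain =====

-- B replaces A's O(position) step-by-step walk around the 40-square board by
-- position mod 40 and one closed-form formula per board side (O(1)).

-- ===== PORT A =====
def go_player_picturex : Int := 497
def go_player_picturey : Int := 501
def start_trip : Int := 500
def end_trip : Int := 50
def step_trip : Int := 46
def magic_trip : Int := 20

-- A's loop body, step for step
def fpStep (s : Int × Int) : Int × Int :=
  let picx := s.1
  let picy := s.2
  if picx > end_trip ∧ picy > start_trip then (picx - step_trip, picy)
  else if picx < end_trip ∧ picy > end_trip then (picx, picy - step_trip)
  else if picx < start_trip - magic_trip ∧ picy < end_trip then (picx + step_trip, picy)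
  else (picx, picy + step_trip)

def find_position_x_y (position : Int) : Int × Int :=
  (PySem.List.pyRange 0 position 1).foldl (fun s _ => fpStep s)
    (go_player_picturex, go_player_picturey)

-- ===== PORT B =====
-- closed-form coordinates for one lap position p (0 ≤ p < 40)
def fpSeg (p : Int) : Int × Int :=
  if p ≤ 10 then (497 - 46 * p, 501)
  else if p ≤ 20 then (37, 501 - 46 * (p - 10))
  else if p ≤ 30 then (37 + 46 * (p - 20), 41)
  else (497, 41 + 46 * (p - 30))

def find_position_x_y_alt (position : Int) : Int × Int :=
  fpSeg (if position ≤ 0 then 0 else PySem.Int.mod position 40)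

-- ===== PRECONDITION & SPEC =====
def Spec_find_position_x_y (position : Int) (out : Int × Int) : Prop := out = find_position_x_y_alt position
instance (position : Int) (out : Int × Int) : Decidable (Spec_find_position_x_y position out) := by unfold Spec_find_position_x_y; infer_instance

-- ===== CLAIM (what is proved, stated in full; the proofs are below) =====
def Claim_equal_find_position_x_y : Prop := ∀ (position : Int), Dom_find_position_x_y position → Spec_find_position_x_y position (find_position_x_y position)

-- ===== LEMMAS AND PROOFS =====

-- folding a state-only step over any list is iteration of the step
theorem foldl_const_iterate {α β : Type} (f : α → α) (l : List β) (init : α) :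
    l.foldl (fun s _ => f s) init = f^[l.length] init := by
  induction l generalizing init with
  | nil => rfl
  | cons x t ih => simp [List.foldl_cons, ih, Function.iterate_succ_apply]

-- one step of A's walk advances the lap position by one (mod 40)
theorem fpStep_seg : ∀ r : Fin 40,
    fpStep (fpSeg ((r : Nat) : Int)) = fpSeg ((((r : Nat) + 1) % 40 : Nat) : Int) := by
  decide

theorem iterate_fpStep (n : Nat) :
    fpStep^[n] (go_player_picturex, go_player_picturey) = fpSeg ((n % 40 : Nat) : Int) := by
  induction n with
  | zero => decide
  | succ n ih =>
    rw [Function.iterate_succ_apply', ih]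
    have h : fpStep (fpSeg ((n % 40 : Nat) : Int))
        = fpSeg ((((n % 40) + 1) % 40 : Nat) : Int) :=
      fpStep_seg ⟨n % 40, Nat.mod_lt _ (by norm_num)⟩
    rw [h]
    congr 2
    omega

-- ===== VERDICT (by name: the statement is the Claim_ definition above) =====
theorem find_position_x_y_spec : Claim_equal_find_position_x_y := by
  intro position _
  unfold Spec_find_position_x_y find_position_x_y find_position_x_y_alt
  rw [foldl_const_iterate]
  by_cases hp : position ≤ 0
  · rw [PySem.List.pyRange_one_eq_nil (by omega), if_pos hp]
    decide
  · rw [if_neg hp, PySem.List.length_pyRange_one]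
    obtain ⟨n, rfl⟩ : ∃ n : Nat, position = (n : Int) :=
      ⟨position.toNat, (Int.toNat_of_nonneg (by omega)).symm⟩
    have hl : ((n : Int) - 0).toNat = n := by omega
    rw [hl, iterate_fpStep]
    congr 1
    exact_mod_cast (PySem.Int.mod_natCast n 40).symm
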